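-- pv_equiv track=rewrite | github.com/thegeek-sys/uni | FP/EXAMS/20-12-22_solved/program.py | recu1
-- ===== SOURCE A (Python) =====
-- def recu1(strings, let, n, num=1):
--     rez = set()
--
--     # caso base
--     if num == n:
--         return let
--
--     else:
--
--         for i in let:
--             for j in strings:
--                 if not j in i:
--                     rez.add(i+j)
--         rez = recu1(strings, rez, n, num+1)
--         # rez = rez | part
--     return rez
-- ===== SOURCE B (Python) =====
-- def recu1(strings, let, n, num=1):
--     current = let
--     while num != n:
--         rez = set()
--         for i in current:
--             for j in strings:
--                 if j not in i:
--                     rez.add(i + j)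
--         current = rez
--         num += 1
--     return current
-- ===== Notes on version B (the rewrite author's own statement) =====
-- stated objective: simpler
-- what changed: The tail recursion of A is replaced by an explicit while-loop that repeatedly rebuilds the set in a local variable; the inner expansion step is the same.
import Mathlib
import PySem

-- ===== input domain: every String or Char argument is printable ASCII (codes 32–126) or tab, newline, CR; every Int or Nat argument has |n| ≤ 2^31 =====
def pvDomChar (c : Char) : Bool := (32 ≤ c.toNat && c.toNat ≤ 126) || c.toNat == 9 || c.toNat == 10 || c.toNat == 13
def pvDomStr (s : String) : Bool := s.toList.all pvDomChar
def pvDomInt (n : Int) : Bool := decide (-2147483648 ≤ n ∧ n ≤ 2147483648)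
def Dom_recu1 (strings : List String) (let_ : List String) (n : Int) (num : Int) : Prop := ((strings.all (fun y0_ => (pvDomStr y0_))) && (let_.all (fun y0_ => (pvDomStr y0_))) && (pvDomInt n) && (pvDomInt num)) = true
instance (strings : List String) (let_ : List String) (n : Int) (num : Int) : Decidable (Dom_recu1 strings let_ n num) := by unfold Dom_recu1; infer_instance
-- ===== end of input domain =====

-- B replaces A's tail recursion by an explicit while-loop over the same expansion step (objective: simpler).

-- ===== PORT A =====
-- the inner double loop building the fresh set rez (shared shape of both Pythons' loop bodies)
def pvExpand (strings : List String) (cur : List String) : List String :=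
  cur.foldl (fun rez i =>
    strings.foldl (fun rez j =>
      if PySem.Str.isIn j i then rez else PySem.Set.add rez (i ++ j)) rez)
    PySem.Set.empty

def recu1 (strings : List String) (let_ : List String) (n : Int) (num : Int) : List String :=
  if num = n then let_
  else
    -- Python recurses with num+1; for num > n it never terminates (RecursionError, excluded by Pre_);
    -- the num < n guard is a totality guard only
    if num < n then recu1 strings (pvExpand strings let_) n (num + 1)
    else pvExpand strings let_
termination_by (n - num).toNat
decreasing_by omega

-- ===== PORT B =====
-- the while-loop 'while num != n: … num += 1' runs exactly (n - num) iterations when num ≤ n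
def recu1AltLoop (strings : List String) : Nat → List String → List String
  | 0, cur => cur
  | k + 1, cur => recu1AltLoop strings k (pvExpand strings cur)

def recu1_alt (strings : List String) (let_ : List String) (n : Int) (num : Int) : List String :=
  recu1AltLoop strings (n - num).toNat let_

-- ===== PRECONDITION & SPEC =====
-- Pre_ excludes num > n, where Python A hits unbounded recursion (RecursionError) and B loops forever.
def Pre_recu1 (strings : List String) (let_ : List String) (n : Int) (num : Int) : Prop := num ≤ n
instance (strings : List String) (let_ : List String) (n : Int) (num : Int) : Decidable (Pre_recu1 strings let_ n num) := by unfold Pre_recu1; infer_instance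
def pvWitness_recu1 : List String × List String × Int × Int := (["ab", "c"], ["x", "y"], 3, 1)

def Spec_recu1 (strings : List String) (let_ : List String) (n : Int) (num : Int) (out : List String) : Prop := out = recu1_alt strings let_ n num
instance (strings : List String) (let_ : List String) (n : Int) (num : Int) (out : List String) : Decidable (Spec_recu1 strings let_ n num out) := by unfold Spec_recu1; infer_instance

-- ===== CLAIM (what is proved, stated in full; the proofs are below) =====
def Claim_equal_recu1 : Prop := ∀ (strings : List String) (let_ : List String) (n : Int) (num : Int), Dom_recu1 strings let_ n num → Pre_recu1 strings let_ n num → Spec_recu1 strings let_ n num (recu1 strings let_ n num)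

-- ===== LEMMAS AND PROOFS =====
theorem recu1_eq_loop (strings : List String) (n : Int) :
    ∀ (k : Nat) (let_ : List String) (num : Int), num ≤ n → (n - num).toNat = k →
      recu1 strings let_ n num = recu1AltLoop strings k let_ := by
  intro k
  induction k with
  | zero =>
    intro let_ num hle hk
    have : num = n := by omega
    rw [recu1]
    simp [this, recu1AltLoop]
  | succ m ih =>
    intro let_ num hle hk
    have hne : num ≠ n := by omega
    have hlt : num < n := by omega
    rw [recu1]
    simp only [hne, if_false, hlt, if_true]
    exact ih (pvExpand strings let_) (num + 1) (by omega) (by omega)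

-- ===== VERDICT (by name: the statement is the Claim_ definition above) =====
theorem recu1_spec : Claim_equal_recu1 := by
  intro strings let_ n num _ hpre
  unfold Spec_recu1 recu1_alt
  exact recu1_eq_loop strings n _ let_ num hpre rfl
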